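-- pv_equiv track=rewrite | github.com/hypnooss/iscope-360-vision | python-agent/agent/executors/domain_whois.py | _resolve_rdap_url
-- ===== SOURCE A (Python) =====
-- RDAP_SERVERS = {
--     '.br': 'https://rdap.registro.br/domain/{}',
--     '.com': 'https://rdap.verisign.com/com/v1/domain/{}',
--     '.net': 'https://rdap.verisign.com/net/v1/domain/{}',
--     '.org': 'https://rdap.org/domain/{}',
--     '.io': 'https://rdap.org/domain/{}',
--     '.dev': 'https://rdap.org/domain/{}',
--     '.app': 'https://rdap.org/domain/{}',
--     '.services': 'https://rdap.org/domain/{}',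
--     '.cloud': 'https://rdap.org/domain/{}',
--     '.info': 'https://rdap.org/domain/{}',
-- }
--
-- DEFAULT_RDAP = 'https://rdap.org/domain/{}'
--
-- def _resolve_rdap_url(domain, config):
--     # type: (str, Dict[str, Any]) -> str
--     """Find best RDAP endpoint by longest TLD suffix match."""
--     servers = dict(RDAP_SERVERS)
--     custom = config.get('rdap_servers', {})
--     if isinstance(custom, dict):
--         servers.update(custom)
--
--     best_url = DEFAULT_RDAP
--     best_len = 0
--     for suffix, url_tpl in servers.items():
--         if domain.endswith(suffix) and len(suffix) > best_len:
--             best_url = url_tpl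
--             best_len = len(suffix)
--
--     return best_url.format(domain)
-- ===== SOURCE B (Python) =====
-- RDAP_SERVERS = {
--     '.br': 'https://rdap.registro.br/domain/{}',
--     '.com': 'https://rdap.verisign.com/com/v1/domain/{}',
--     '.net': 'https://rdap.verisign.com/net/v1/domain/{}',
--     '.org': 'https://rdap.org/domain/{}',
--     '.io': 'https://rdap.org/domain/{}',
--     '.dev': 'https://rdap.org/domain/{}',
--     '.app': 'https://rdap.org/domain/{}',
--     '.services': 'https://rdap.org/domain/{}',
--     '.cloud': 'https://rdap.org/domain/{}',
--     '.info': 'https://rdap.org/domain/{}',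
-- }
--
-- DEFAULT_RDAP = 'https://rdap.org/domain/{}'
--
--
-- def _resolve_rdap_url(domain, config):
--     # type: (str, dict) -> str
--     """Longest-suffix RDAP lookup: try each suffix of the domain, longest
--     first, as a direct dict key probe instead of scanning all server keys."""
--     servers = dict(RDAP_SERVERS)
--     custom = config.get('rdap_servers', {})
--     if isinstance(custom, dict):
--         servers.update(custom)
--
--     longest = max(map(len, servers), default=0)
--     tpl = DEFAULT_RDAP
--     for i in range(max(len(domain) - longest, 0), len(domain)):
--         hit = servers.get(domain[i:])
--         if hit is not None:
--             tpl = hit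
--             break
--     return tpl.format(domain)
-- ===== Notes on version B (the rewrite author's own statement) =====
-- stated objective: idiomatic
-- what changed: Instead of scanning every server key and testing domain.endswith while tracking the best length, B probes the merged servers dict directly with each suffix domain[i:] from longest to shortest (starting at the longest server-key length) and stops at the first hit.
-- outside the precondition, e.g. on _resolve_rdap_url('a', {'rdap_servers': {'a': '{{'}}): A returns '{', B returns '{'
import Mathlib
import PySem

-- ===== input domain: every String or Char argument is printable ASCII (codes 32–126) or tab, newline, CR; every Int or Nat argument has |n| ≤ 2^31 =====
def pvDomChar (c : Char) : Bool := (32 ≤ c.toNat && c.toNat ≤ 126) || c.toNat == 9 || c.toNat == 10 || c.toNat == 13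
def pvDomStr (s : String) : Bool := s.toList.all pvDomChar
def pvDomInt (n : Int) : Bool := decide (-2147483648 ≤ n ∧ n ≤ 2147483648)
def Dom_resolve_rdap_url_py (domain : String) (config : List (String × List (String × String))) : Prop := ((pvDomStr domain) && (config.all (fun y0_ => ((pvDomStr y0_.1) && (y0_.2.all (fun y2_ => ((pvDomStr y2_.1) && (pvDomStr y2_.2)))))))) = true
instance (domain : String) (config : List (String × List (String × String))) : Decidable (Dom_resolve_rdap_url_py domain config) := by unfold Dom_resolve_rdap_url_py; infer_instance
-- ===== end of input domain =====

-- B replaces A's scan over every server key with a direct dict probe of each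
-- suffix of the domain, longest first (objective: alternative/idiomatic).

-- shared module-level constants (RDAP_SERVERS / DEFAULT_RDAP of the Python module)
def pvRdapServers : List (String × String) :=
  [(".br", "https://rdap.registro.br/domain/{}"),
   (".com", "https://rdap.verisign.com/com/v1/domain/{}"),
   (".net", "https://rdap.verisign.com/net/v1/domain/{}"),
   (".org", "https://rdap.org/domain/{}"),
   (".io", "https://rdap.org/domain/{}"),
   (".dev", "https://rdap.org/domain/{}"),
   (".app", "https://rdap.org/domain/{}"),
   (".services", "https://rdap.org/domain/{}"),
   (".cloud", "https://rdap.org/domain/{}"),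
   (".info", "https://rdap.org/domain/{}")]

def pvDefaultRdap : String := "https://rdap.org/domain/{}"

-- hand port of `tpl.format(arg)`: exact exactly when the braces of tpl are at most
-- one '{}' placeholder — which Pre_ below guarantees for every admitted input.
def pvFormat1 (tpl arg : String) : String := PySem.Str.replace tpl "{}" arg

-- ===== PORT A =====
def resolve_rdap_url_py (domain : String) (config : List (String × List (String × String))) : String :=
  let servers := PySem.Dict.update (PySem.Dict.ofList pvRdapServers)
      (PySem.Dict.getD (PySem.Dict.mk config) "rdap_servers" [])
  let best := servers.items.foldl
      (fun (st : String × Int) p =>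
        if PySem.Str.endswith domain p.1 && decide ((PySem.Str.len p.1 : Int) > st.2)
        then (p.2, (PySem.Str.len p.1 : Int)) else st)
      (pvDefaultRdap, 0)
  pvFormat1 best.1 domain

-- ===== PORT B =====
def resolve_rdap_url_py_alt (domain : String) (config : List (String × List (String × String))) : String :=
  let servers := PySem.Dict.update (PySem.Dict.ofList pvRdapServers)
      (PySem.Dict.getD (PySem.Dict.mk config) "rdap_servers" [])
  -- max(map(len, servers), default=0): key lengths are ≥ 0, so this is foldl max 0 (exact here)
  let longest : Int := (servers.keys.map (fun k => (PySem.Str.len k : Int))).foldl max 0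
  let tpl :=
    match (PySem.List.pyRange (max ((PySem.Str.len domain : Int) - longest) 0)
          (PySem.Str.len domain : Int) 1).findSome?
        (fun i => servers.get? (PySem.Str.slice domain (some i) none)) with
    | some u => u
    | none => pvDefaultRdap
  pvFormat1 tpl domain

-- ===== PRECONDITION & SPEC =====
-- a template string whose braces are at most one '{}' placeholder: on these
-- str.format(domain) is exactly pvFormat1 and never raises
def pvBraceOk (v : String) : Prop :=
  PySem.Str.count v "{" = PySem.Str.count v "}" ∧
  PySem.Str.count v "{}" = PySem.Str.count v "{" ∧ PySem.Str.count v "{" ≤ 1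

-- Pre_ excludes configs whose custom rdap_servers carry a template with braces other
-- than a single '{}' placeholder: if such a template is chosen, str.format raises
-- (IndexError/KeyError/ValueError) or performs '{{'/'}}' escaping not modelled here.
def Pre_resolve_rdap_url_py (domain : String) (config : List (String × List (String × String))) : Prop :=
  ∀ p ∈ PySem.Dict.getD (PySem.Dict.mk config) "rdap_servers" [], pvBraceOk p.2
instance (domain : String) (config : List (String × List (String × String))) : Decidable (Pre_resolve_rdap_url_py domain config) := by unfold Pre_resolve_rdap_url_py pvBraceOk; infer_instance

def pvWitness_resolve_rdap_url_py : String × (List (String × List (String × String))) :=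
  ("sub.example.com", [("rdap_servers", [("example.com", "https://rdap.example/{}")])])

def Spec_resolve_rdap_url_py (domain : String) (config : List (String × List (String × String))) (out : String) : Prop := out = resolve_rdap_url_py_alt domain config
instance (domain : String) (config : List (String × List (String × String))) (out : String) : Decidable (Spec_resolve_rdap_url_py domain config out) := by unfold Spec_resolve_rdap_url_py; infer_instance

-- ===== CLAIM (what is proved, stated in full; the proofs are below) =====
def Claim_equal_resolve_rdap_url_py : Prop := ∀ (domain : String) (config : List (String × List (String × String))), Dom_resolve_rdap_url_py domain config → Pre_resolve_rdap_url_py domain config → Spec_resolve_rdap_url_py domain config (resolve_rdap_url_py domain config)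

-- ===== LEMMAS AND PROOFS =====

-- endswith is list-suffix
lemma pv_endswith_iff (domain s : String) :
    PySem.Str.endswith domain s = true ↔ s.toList <:+ domain.toList := by
  rw [PySem.Str.endswith_eq, PySem.Chars.endswith_iff]

-- the String suffix domain[k:]
lemma pv_toList_slice_from (domain : String) (k : Nat) :
    (PySem.Str.slice domain (some (k : Int)) none).toList = domain.toList.drop k := by
  simp [PySem.Str.toList_slice, PySem.List.slice_from_natCast]

-- A's fold does not move when no candidate beats the current best length
lemma pv_foldA_no (domain : String) (l : List (String × String)) (st : String × Int)
    (h : ∀ p ∈ l, PySem.Str.endswith domain p.1 = true → (PySem.Str.len p.1 : Int) ≤ st.2) :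
    l.foldl
      (fun (st : String × Int) p =>
        if PySem.Str.endswith domain p.1 && decide ((PySem.Str.len p.1 : Int) > st.2)
        then (p.2, (PySem.Str.len p.1 : Int)) else st) st = st := by
  induction l generalizing st with
  | nil => rfl
  | cons q t ih =>
    simp only [List.foldl_cons]
    rw [if_neg, ih st (fun p hp hE => h p (List.mem_cons_of_mem q hp) hE)]
    simp only [Bool.and_eq_true, decide_eq_true_eq, not_and, not_lt]
    intro hE
    exact h q (List.mem_cons_self ..) hE

-- A's fold lands on the unique longest matching entry
lemma pv_foldA_max (domain s u : String) (hE : PySem.Str.endswith domain s = true) :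
    ∀ (l : List (String × String)) (st : String × Int), (s, u) ∈ l →
    st.2 < (PySem.Str.len s : Int) →
    (∀ p ∈ l, PySem.Str.endswith domain p.1 = true → (PySem.Str.len p.1 : Int) ≤ (PySem.Str.len s : Int)) →
    (∀ p ∈ l, PySem.Str.endswith domain p.1 = true → PySem.Str.len p.1 = PySem.Str.len s → p = (s, u)) →
    l.foldl
      (fun (st : String × Int) p =>
        if PySem.Str.endswith domain p.1 && decide ((PySem.Str.len p.1 : Int) > st.2)
        then (p.2, (PySem.Str.len p.1 : Int)) else st) st = (u, (PySem.Str.len s : Int)) := by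
  intro l
  induction l with
  | nil => intro st hmem _ _ _; cases hmem
  | cons q t ih =>
    intro st hmem hgt hmax huni
    simp only [List.foldl_cons]
    by_cases hq : PySem.Str.endswith domain q.1 = true ∧ st.2 < (PySem.Str.len q.1 : Int)
    · rw [if_pos (by simp only [hq.1, Bool.true_and, decide_eq_true_eq]; exact hq.2)]
      by_cases hqe : PySem.Str.len q.1 = PySem.Str.len s
      · have hqsu : q = (s, u) := huni q (List.mem_cons_self ..) hq.1 hqe
        rw [hqsu]
        exact pv_foldA_no domain t (u, (PySem.Str.len s : Int))
          (fun p hp hpE => hmax p (List.mem_cons_of_mem _ hp) hpE)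
      · have hts : (s, u) ∈ t := by
          rcases List.mem_cons.mp hmem with h | h
          · exact absurd (congrArg (fun p => PySem.Str.len (Prod.fst p)) h.symm) hqe
          · exact h
        have hlt : (PySem.Str.len q.1 : Int) < (PySem.Str.len s : Int) := by
          have := hmax q (List.mem_cons_self ..) hq.1
          omega
        exact ih (q.2, (PySem.Str.len q.1 : Int)) hts hlt
          (fun p hp hpE => hmax p (List.mem_cons_of_mem _ hp) hpE)
          (fun p hp hpE hpl => huni p (List.mem_cons_of_mem _ hp) hpE hpl)
    · have hts : (s, u) ∈ t := by
        rcases List.mem_cons.mp hmem with h | h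
        · exact absurd ⟨by rw [← h]; exact hE, by rw [← h]; exact hgt⟩ hq
        · exact h
      rw [if_neg (by simp only [Bool.and_eq_true, decide_eq_true_eq]; exact hq)]
      exact ih st hts hgt
        (fun p hp hpE => hmax p (List.mem_cons_of_mem _ hp) hpE)
        (fun p hp hpE hpl => huni p (List.mem_cons_of_mem _ hp) hpE hpl)

-- B's probe over range(a, n) returns none when every suffix probe misses
lemma pv_findSome_range_none (a : Int) (n : Nat) (f : Int → Option String)
    (ha : 0 ≤ a)
    (h : ∀ k : Nat, k < n → f (k : Int) = none) :
    (PySem.List.pyRange a (n : Int) 1).findSome? f = none := by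
  refine List.findSome?_eq_none_iff.mpr (fun x hx => ?_)
  rw [PySem.List.mem_pyRange_one] at hx
  have hx0 : x = (x.toNat : Int) := by omega
  rw [hx0]
  exact h x.toNat (by omega)

-- B's probe returns the first hit
lemma pv_findSome_range_hit (a : Int) (n i : Nat) (u : String) (f : Int → Option String)
    (ha : 0 ≤ a) (hai : a ≤ (i : Int)) (hi : i < n)
    (hnone : ∀ k : Nat, k < i → f (k : Int) = none)
    (hsome : f (i : Int) = some u) :
    (PySem.List.pyRange a (n : Int) 1).findSome? f = some u := by
  rw [PySem.List.pyRange_one_append a (i : Int) (n : Int) hai (by omega),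
    List.findSome?_append, pv_findSome_range_none a i f ha hnone,
    PySem.List.pyRange_one_cons (by omega : (i : Int) < (n : Int))]
  simp [hsome]

lemma pv_len_toList (s : String) : PySem.Str.len s = s.toList.length := by
  simp [pysem]

-- the two loops agree for ANY server table with unique keys
lemma pv_core (domain : String) (servers : PySem.Dict String String)
    (hnd : servers.keys.Nodup) :
    (servers.items.foldl
      (fun (st : String × Int) p =>
        if PySem.Str.endswith domain p.1 && decide ((PySem.Str.len p.1 : Int) > st.2)
        then (p.2, (PySem.Str.len p.1 : Int)) else st)
      (pvDefaultRdap, 0)).1 =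
    (match (PySem.List.pyRange
          (max ((PySem.Str.len domain : Int) -
            (servers.keys.map (fun k => (PySem.Str.len k : Int))).foldl max 0) 0)
          (PySem.Str.len domain : Int) 1).findSome?
        (fun i => servers.get? (PySem.Str.slice domain (some i) none)) with
    | some u => u
    | none => pvDefaultRdap) := by
  have hlen := pv_len_toList
  have hnd' : (servers.items.map Prod.fst).Nodup := hnd
  rw [hlen domain]
  by_cases hM : ∃ p ∈ servers.items, PySem.Str.endswith domain p.1 = true ∧ p.1.toList ≠ []
  · -- some nonempty key of the table is a suffix of the domain
    obtain ⟨p0, hp0mem, hp0E, hp0ne⟩ := hM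
    have hp0M : p0 ∈ servers.items.filter (fun p => PySem.Str.endswith domain p.1) :=
      List.mem_filter.mpr ⟨hp0mem, hp0E⟩
    rcases hq0 : (servers.items.filter (fun p => PySem.Str.endswith domain p.1)).argmax
        (fun p => p.1.toList.length) with _ | q
    · exact absurd (List.argmax_eq_none.mp hq0) (List.ne_nil_of_mem hp0M)
    have hqM := List.argmax_mem (Option.mem_def.mpr hq0)
    have hqmem : q ∈ servers.items := (List.mem_filter.mp hqM).1
    have hqE : PySem.Str.endswith domain q.1 = true := by
      simpa using (List.mem_filter.mp hqM).2
    have hmax : ∀ p ∈ servers.items, PySem.Str.endswith domain p.1 = true →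
        p.1.toList.length ≤ q.1.toList.length := by
      intro p hp hpE
      exact List.le_of_mem_argmax (f := fun p : String × String => p.1.toList.length)
        (List.mem_filter.mpr ⟨hp, hpE⟩) (Option.mem_def.mpr hq0)
    have hsuf : q.1.toList <:+ domain.toList := (pv_endswith_iff domain q.1).mp hqE
    have hLn : q.1.toList.length ≤ domain.toList.length := hsuf.length_le
    have hL1 : 1 ≤ q.1.toList.length := by
      have h0 : 1 ≤ p0.1.toList.length := by
        cases h : p0.1.toList with
        | nil => exact absurd h hp0ne
        | cons _ l => exact Nat.le_add_left 1 l.length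
      exact le_trans h0 (hmax p0 hp0mem hp0E)
    have hqdrop : q.1.toList = domain.toList.drop (domain.toList.length - q.1.toList.length) :=
      List.suffix_iff_eq_drop.mp hsuf
    have huni : ∀ p ∈ servers.items, PySem.Str.endswith domain p.1 = true →
        PySem.Str.len p.1 = PySem.Str.len q.1 → p = (q.1, q.2) := by
      intro p hp hpE hpl
      rw [hlen, hlen] at hpl
      have hpl' : p.1.toList.length = q.1.toList.length := by exact_mod_cast hpl
      have hpdrop : p.1.toList = domain.toList.drop (domain.toList.length - p.1.toList.length) :=
        List.suffix_iff_eq_drop.mp ((pv_endswith_iff domain p.1).mp hpE)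
      have hkey : p.1 = q.1 := String.toList_inj.mp (by rw [hpdrop, hpl', ← hqdrop])
      have := List.inj_on_of_nodup_map hnd' hp hqmem hkey
      simpa using this
    rw [pv_foldA_max domain q.1 q.2 hqE servers.items (pvDefaultRdap, 0)
      (by simpa using hqmem) (by show (0:Int) < _; rw [hlen]; exact_mod_cast hL1)
      (fun p hp hpE => by rw [hlen, hlen]; exact_mod_cast hmax p hp hpE) huni]
    have hlong : (PySem.Str.len q.1 : Int) ≤
        (servers.keys.map (fun k => (PySem.Str.len k : Int))).foldl max 0 := by
      refine (PySem.List.le_foldl_max _ 0).2 _ ?_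
      exact List.mem_map.mpr ⟨q.1, List.mem_map.mpr ⟨q, hqmem, rfl⟩, rfl⟩
    rw [hlen q.1] at hlong
    rw [pv_findSome_range_hit _ domain.toList.length (domain.toList.length - q.1.toList.length) q.2 _
      (by omega) (by omega) (by omega)
      (?_ : ∀ k : Nat, k < domain.toList.length - q.1.toList.length → _)
      ?_]
    · intro k hk
      cases hget : servers.get? (PySem.Str.slice domain (some (k : Int)) none) with
      | none => rfl
      | some u =>
        exfalso
        have hmem := PySem.Dict.mem_items_of_get?_eq_some servers hget
        have hE : PySem.Str.endswith domain (PySem.Str.slice domain (some (k : Int)) none) = true := by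
          rw [pv_endswith_iff, pv_toList_slice_from]
          exact List.drop_suffix k domain.toList
        have := hmax _ hmem hE
        rw [pv_toList_slice_from, List.length_drop] at this
        omega
    · have hstr : PySem.Str.slice domain
          (some ((domain.toList.length - q.1.toList.length : Nat) : Int)) none = q.1 :=
        String.toList_inj.mp (by rw [pv_toList_slice_from, ← hqdrop])
      rw [hstr]
      exact PySem.Dict.get?_of_mem_items servers hqmem hnd
  · -- no nonempty key matches: A keeps the default, every probe of B misses
    push Not at hM
    rw [pv_foldA_no domain servers.items (pvDefaultRdap, 0)
      (fun p hp hpE => by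
        rw [hlen, hM p hp hpE]
        simp)]
    rw [pv_findSome_range_none _ domain.toList.length _ (by omega)
      (fun k hk => ?_)]
    cases hget : servers.get? (PySem.Str.slice domain (some (k : Int)) none) with
    | none => rfl
    | some u =>
      exfalso
      have hmem := PySem.Dict.mem_items_of_get?_eq_some servers hget
      have hE : PySem.Str.endswith domain (PySem.Str.slice domain (some (k : Int)) none) = true := by
        rw [pv_endswith_iff, pv_toList_slice_from]
        exact List.drop_suffix k domain.toList
      have := hM _ hmem hE
      rw [pv_toList_slice_from] at this
      have : domain.toList.length - k = 0 := by
        simpa using congrArg List.length this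
      omega

-- ===== VERDICT (by name: the statement is the Claim_ definition above) =====
theorem resolve_rdap_url_py_spec : Claim_equal_resolve_rdap_url_py := by
  intro domain config _hDom _hPre
  unfold Spec_resolve_rdap_url_py resolve_rdap_url_py resolve_rdap_url_py_alt
  exact congrArg (fun t => pvFormat1 t domain)
    (pv_core domain _ (PySem.Dict.nodup_keys_update _ _ (PySem.Dict.nodup_keys_ofList _)))
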